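-- pv_equiv track=rewrite | github.com/sjmoon00/problem-solving | 프로그래머스/1/42862. 체육복/체육복.py | solution
-- ===== SOURCE A (Python) =====
-- def solution(n, lost, reserve):
--     answer = 0
--     lost_s = set(lost) - set(reserve)
--     reserve_s = list(set(reserve) - set(lost))
--     reserve_s.sort()
--
--     for i in reserve_s:
--         left, right = i-1, i+1
--         if left in lost_s:
--             lost_s.remove(left)
--         elif right in lost_s:
--             lost_s.remove(right)
--
--     answer = n - len(lost_s)
--     return answer
-- ===== SOURCE B (Python) =====
-- def solution(n, lost, reserve):
--     # Two-pointer merge over the two sorted difference lists: no set is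
--     # mutated during the scan; a cursor j walks the sorted lost-only list
--     # left to right.  Elements skipped because they are below r-1 can never
--     # be matched by a later (larger) reserve, and the first remaining
--     # element >= r-1 is the only candidate, so the merge reproduces A's
--     # left-preferring greedy exactly.
--     L = sorted(set(lost) - set(reserve))
--     R = sorted(set(reserve) - set(lost))
--     j = 0
--     matched = 0
--     for r in R:
--         while j < len(L) and L[j] < r - 1:
--             j += 1
--         if j < len(L) and (L[j] == r - 1 or L[j] == r + 1):
--             matched += 1
--             j += 1
--     return n - (len(L) - matched)
-- ===== Notes on version B (the rewrite author's own statement) =====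
-- stated objective: alternative
-- what changed: A scans sorted reserves while mutating a lost-set via membership tests and removals; B never mutates a set: it merges the two sorted difference lists with a two-pointer walk, consuming a cursor over the sorted lost-only list and counting matches.
import Mathlib
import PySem

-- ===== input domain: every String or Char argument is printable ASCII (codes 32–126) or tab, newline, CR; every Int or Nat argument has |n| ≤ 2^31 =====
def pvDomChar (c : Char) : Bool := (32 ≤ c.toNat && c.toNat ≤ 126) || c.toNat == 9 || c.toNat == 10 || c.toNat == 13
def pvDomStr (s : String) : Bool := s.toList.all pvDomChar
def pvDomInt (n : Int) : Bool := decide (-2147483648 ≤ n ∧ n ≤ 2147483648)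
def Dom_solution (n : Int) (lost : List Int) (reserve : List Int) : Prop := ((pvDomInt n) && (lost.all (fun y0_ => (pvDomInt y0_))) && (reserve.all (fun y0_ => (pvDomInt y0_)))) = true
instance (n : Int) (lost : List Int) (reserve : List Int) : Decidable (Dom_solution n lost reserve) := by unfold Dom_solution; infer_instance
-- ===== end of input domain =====

-- B replaces A's mutated lost-set (membership tests + removals) by a two-pointer
-- merge of the two sorted difference lists; objective: alternative.

-- ===== PORT A =====
def solution (n : Int) (lost : List Int) (reserve : List Int) : Int :=
  let lost_s : PySem.Set Int := PySem.Set.diff (PySem.Set.ofList lost) (PySem.Set.ofList reserve)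
  let reserve_s : List Int :=
    PySem.List.sorted (PySem.Set.diff (PySem.Set.ofList reserve) (PySem.Set.ofList lost)) (fun x => x) false
  let final : PySem.Set Int := reserve_s.foldl (fun s i =>
    if PySem.Set.contains s (i - 1) then PySem.Set.discard s (i - 1)   -- remove after the 'in' check = discard
    else if PySem.Set.contains s (i + 1) then PySem.Set.discard s (i + 1)
    else s) lost_s
  n - PySem.Set.len final

-- ===== PORT B =====
-- Source B's inner 'while ls and ls[0] < r - 1: ls = ls[1:]' as structural recursion
def dropBelow (r : Int) : List Int → List Int
  | [] => []
  | x :: xs => if x < r - 1 then dropBelow r xs else x :: xs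

def solution_alt (n : Int) (lost : List Int) (reserve : List Int) : Int :=
  let L : List Int :=
    PySem.List.sorted (PySem.Set.diff (PySem.Set.ofList lost) (PySem.Set.ofList reserve)) (fun x => x) false
  let R : List Int :=
    PySem.List.sorted (PySem.Set.diff (PySem.Set.ofList reserve) (PySem.Set.ofList lost)) (fun x => x) false
  let st : List Int × Int := R.foldl (fun st r =>
    let ls := dropBelow r st.1
    match ls with
    | [] => (([] : List Int), st.2)
    | x :: xs => if x = r - 1 ∨ x = r + 1 then (xs, st.2 + 1) else (x :: xs, st.2)) (L, (0 : Int))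
  n - ((L.length : Int) - st.2)

-- ===== PRECONDITION & SPEC =====
def Spec_solution (n : Int) (lost : List Int) (reserve : List Int) (out : Int) : Prop := out = solution_alt n lost reserve
instance (n : Int) (lost : List Int) (reserve : List Int) (out : Int) : Decidable (Spec_solution n lost reserve out) := by unfold Spec_solution; infer_instance

-- ===== CLAIM (what is proved, stated in full; the proofs are below) =====
def Claim_equal_solution : Prop := ∀ (n : Int) (lost : List Int) (reserve : List Int), Dom_solution n lost reserve → Spec_solution n lost reserve (solution n lost reserve)

-- ===== LEMMAS AND PROOFS =====

-- A's loop body (the fold function of port A), named for the proofs.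
def stepA (s : PySem.Set Int) (i : Int) : PySem.Set Int :=
  if PySem.Set.contains s (i - 1) then PySem.Set.discard s (i - 1)
  else if PySem.Set.contains s (i + 1) then PySem.Set.discard s (i + 1)
  else s

-- B's loop body, named for the proofs.
def stepB (st : List Int × Int) (r : Int) : List Int × Int :=
  let ls := dropBelow r st.1
  match ls with
  | [] => (([] : List Int), st.2)
  | x :: xs => if x = r - 1 ∨ x = r + 1 then (xs, st.2 + 1) else (x :: xs, st.2)

lemma dropBelow_sublist (r : Int) : ∀ ls : List Int, (dropBelow r ls).Sublist ls := by
  intro ls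
  induction ls with
  | nil => simp [dropBelow]
  | cons x xs ih =>
    by_cases h : x < r - 1
    · simp only [dropBelow, if_pos h]
      exact ih.trans (List.sublist_cons_self x xs)
    · simp [dropBelow, if_neg h]

lemma dropBelow_dropped (r : Int) : ∀ ls : List Int, ∀ x ∈ ls, x ∉ dropBelow r ls → x < r - 1 := by
  intro ls
  induction ls with
  | nil => intro x hx; cases hx
  | cons a t ih =>
    intro x hx hnx
    by_cases h : a < r - 1
    · simp only [dropBelow, if_pos h] at hnx
      rcases List.mem_cons.1 hx with rfl | hxt
      · exact h
      · exact ih x hxt hnx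
    · simp only [dropBelow, if_neg h] at hnx
      exact absurd hx hnx

lemma dropBelow_ge (r : Int) : ∀ ls : List Int, ls.Pairwise (· < ·) →
    ∀ x ∈ dropBelow r ls, r - 1 ≤ x := by
  intro ls
  induction ls with
  | nil => intro _ x hx; cases hx
  | cons a t ih =>
    intro hpw x hx
    by_cases h : a < r - 1
    · simp only [dropBelow, if_pos h] at hx
      exact ih (List.pairwise_cons.1 hpw).2 x hx
    · simp only [dropBelow, if_neg h] at hx
      rcases List.mem_cons.1 hx with rfl | hxt
      · omega
      · have := (List.pairwise_cons.1 hpw).1 x hxt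
        omega

lemma discard_sublist (s : List Int) (x : Int) : (PySem.Set.discard s x).Sublist s := by
  simp only [PySem.Set.discard]; exact List.filter_sublist (l := s) (p := fun y => !(y == x))

lemma length_discard_mem : ∀ (s : List Int), s.Nodup → ∀ {x : Int}, x ∈ s →
    (PySem.Set.discard s x).length + 1 = s.length := by
  intro s
  induction s with
  | nil => intro _ x hx; cases hx
  | cons a t ih =>
    intro hnd x hx
    rcases List.mem_cons.1 hx with rfl | hxt
    · have hxt : x ∉ t := (List.nodup_cons.1 hnd).1
      have hfil : List.filter (fun y => !(y == x)) t = t :=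
        List.filter_eq_self.2 (fun y hy => by
          have : y ≠ x := fun h => hxt (h ▸ hy)
          simp [this])
      simp [PySem.Set.discard, hfil]
    · have hax : a ≠ x := fun h => (List.nodup_cons.1 hnd).1 (h ▸ hxt)
      have hrec := ih (List.nodup_cons.1 hnd).2 hxt
      simp only [PySem.Set.discard] at hrec ⊢
      simp [hax]
      omega

-- Invariant: s is A's remaining lost-set, (ls, m) B's cursor/counter. ls points into
-- the sorted lost-only list L; members of s off the cursor are dead (below every
-- future reserve minus one), so |s| stays |L| - m throughout.
lemma loop_inv (L : List Int) (hLpw : L.Pairwise (· < ·)) :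
    ∀ (rs s ls : List Int) (m : Int),
      rs.Pairwise (· < ·) →
      (∀ r ∈ rs, r ∉ L) →
      s.Nodup →
      (∀ x ∈ s, x ∈ L) →
      ls.Sublist L →
      (∀ x ∈ ls, x ∈ s) →
      (s.length : Int) = (L.length : Int) - m →
      (∀ x ∈ s, x ∉ ls → ∀ r ∈ rs, x < r - 1) →
      ((rs.foldl stepA s).length : Int) = (L.length : Int) - (rs.foldl stepB (ls, m)).2 := by
  intro rs
  induction rs with
  | nil => intro s ls m _ _ _ _ _ _ hlen _; simpa using hlen
  | cons r rs' ih =>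
    intro s ls m hpw hdisj hsnd hsL hlsL hlss hlen hdead
    have hpw' : rs'.Pairwise (· < ·) := (List.pairwise_cons.1 hpw).2
    have hrlt : ∀ r' ∈ rs', r < r' := (List.pairwise_cons.1 hpw).1
    have hdisj' : ∀ r' ∈ rs', r' ∉ L := fun r' h => hdisj r' (List.mem_cons_of_mem _ h)
    have hrL : r ∉ L := hdisj r List.mem_cons_self
    have hlspw : ls.Pairwise (· < ·) := hLpw.sublist hlsL
    have hsubl' : (dropBelow r ls).Sublist ls := dropBelow_sublist r ls
    have hge : ∀ x ∈ dropBelow r ls, r - 1 ≤ x := dropBelow_ge r ls hlspw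
    -- every s-member off the new cursor is < r - 1
    have hdead' : ∀ x ∈ s, x ∉ dropBelow r ls → x < r - 1 := by
      intro x hxs hx
      by_cases hxls : x ∈ ls
      · exact dropBelow_dropped r ls x hxls hx
      · exact hdead x hxs hxls r List.mem_cons_self
    simp only [List.foldl_cons]
    rcases hls' : dropBelow r ls with _ | ⟨x, xs⟩
    · -- cursor exhausted: everything left in s is dead, neither program lends
      have hall : ∀ y ∈ s, y < r - 1 := fun y hy => hdead' y hy (by simp [hls'])
      have hA : stepA s r = s := by
        unfold stepA
        rw [if_neg, if_neg]
        · intro hc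
          have := hall _ ((PySem.Set.contains_iff s (r + 1)).1 hc); omega
        · intro hc
          have := hall _ ((PySem.Set.contains_iff s (r - 1)).1 hc); omega
      have hB : stepB (ls, m) r = ([], m) := by unfold stepB; rw [hls']
      rw [hA, hB]
      apply ih s [] m hpw' hdisj' hsnd hsL (List.nil_sublist L) (by simp) hlen
      intro y hy _ r' hr'
      have := hall y hy
      have := hrlt r' hr'
      omega
    · have hls'pw : (x :: xs).Pairwise (· < ·) := hLpw.sublist (hls' ▸ hsubl'.trans hlsL)
      have hxlt : ∀ y ∈ xs, x < y := (List.pairwise_cons.1 hls'pw).1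
      have hxs' : ∀ y ∈ x :: xs, y ∈ s := fun y hy => hlss y (hsubl'.subset (hls' ▸ hy))
      have hxmem : x ∈ s := hxs' x List.mem_cons_self
      have hxr : x ≠ r := fun h => hrL (h ▸ hsL x hxmem)
      have hxge : r - 1 ≤ x := hge x (by simp [hls'])
      have hxsSubL : (x :: xs).Sublist L := hls' ▸ hsubl'.trans hlsL
      -- membership of r-1 / r+1 in s is decided by the cursor head
      have hmem_iff : ∀ z : Int, r - 1 ≤ z → (z ∈ s ↔ z ∈ x :: xs) := by
        intro z hz
        constructor
        · intro hzs
          by_cases h : z ∈ dropBelow r ls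
          · exact hls' ▸ h
          · have := hdead' z hzs h; omega
        · exact hxs' z
      by_cases hx1 : x = r - 1
      · -- both lend to the left student r-1
        subst hx1
        have hA : stepA s r = PySem.Set.discard s (r - 1) := by
          unfold stepA; rw [if_pos ((PySem.Set.contains_iff s (r - 1)).2 hxmem)]
        have hB : stepB (ls, m) r = (xs, m + 1) := by
          unfold stepB; rw [hls']; simp
        rw [hA, hB]
        have hsnd' : (PySem.Set.discard s (r - 1)).Nodup := hsnd.sublist (discard_sublist s (r - 1))
        apply ih (PySem.Set.discard s (r - 1)) xs (m + 1) hpw' hdisj' hsnd'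
          (fun y hy => hsL y ((discard_sublist s (r - 1)).subset hy))
          ((List.sublist_cons_self (r - 1) xs).trans hxsSubL)
        · intro y hy
          have hys : y ∈ s := hxs' y (List.mem_cons_of_mem _ hy)
          have hne : y ≠ r - 1 := by have := hxlt y hy; omega
          exact (PySem.Set.mem_discard _ _ _).2 ⟨hys, hne⟩
        · have := length_discard_mem s hsnd hxmem; omega
        · intro y hy hynxs r' hr'
          have hys : y ∈ s := (discard_sublist s (r - 1)).subset hy
          have hyne : y ≠ r - 1 := ((PySem.Set.mem_discard _ _ _).1 hy).2
          have hynls' : y ∉ dropBelow r ls := by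
            rw [hls']; intro hc
            rcases List.mem_cons.1 hc with rfl | h
            · exact hyne rfl
            · exact hynxs h
          have := hdead' y hys hynls'
          have := hrlt r' hr'
          omega
      · by_cases hx2 : x = r + 1
        · -- A finds no r-1 (cursor head is r+1), both lend to the right student r+1
          subst hx2
          have hnotleft : r - 1 ∉ s := by
            intro hc
            have := (hmem_iff (r - 1) (le_refl _)).1 hc
            rcases List.mem_cons.1 this with h | h
            · omega
            · have := hxlt _ h; omega
          have hA : stepA s r = PySem.Set.discard s (r + 1) := by
            unfold stepA
            rw [if_neg (fun hc => hnotleft ((PySem.Set.contains_iff s (r - 1)).1 hc)),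
              if_pos ((PySem.Set.contains_iff s (r + 1)).2 hxmem)]
          have hB : stepB (ls, m) r = (xs, m + 1) := by
            unfold stepB; rw [hls']; simp
          rw [hA, hB]
          have hsnd' : (PySem.Set.discard s (r + 1)).Nodup := hsnd.sublist (discard_sublist s (r + 1))
          apply ih (PySem.Set.discard s (r + 1)) xs (m + 1) hpw' hdisj' hsnd'
            (fun y hy => hsL y ((discard_sublist s (r + 1)).subset hy))
            ((List.sublist_cons_self (r + 1) xs).trans hxsSubL)
          · intro y hy
            have hys : y ∈ s := hxs' y (List.mem_cons_of_mem _ hy)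
            have hne : y ≠ r + 1 := by have := hxlt y hy; omega
            exact (PySem.Set.mem_discard _ _ _).2 ⟨hys, hne⟩
          · have := length_discard_mem s hsnd hxmem; omega
          · intro y hy hynxs r' hr'
            have hys : y ∈ s := (discard_sublist s (r + 1)).subset hy
            have hyne : y ≠ r + 1 := ((PySem.Set.mem_discard _ _ _).1 hy).2
            have hynls' : y ∉ dropBelow r ls := by
              rw [hls']; intro hc
              rcases List.mem_cons.1 hc with rfl | h
              · exact hyne rfl
              · exact hynxs h
            have := hdead' y hys hynls'
            have := hrlt r' hr'
            omega
        · -- cursor head is beyond r+1: neither program lends at r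
          have hxbig : r + 1 < x := by omega
          have hno : ∀ z : Int, r - 1 ≤ z → z ≤ r + 1 → z ∉ s := by
            intro z hz1 hz2 hc
            have := (hmem_iff z hz1).1 hc
            rcases List.mem_cons.1 this with rfl | h
            · omega
            · have := hxlt _ h; omega
          have hA : stepA s r = s := by
            unfold stepA
            rw [if_neg, if_neg]
            · intro hc
              exact hno (r + 1) (by omega) (le_refl _) ((PySem.Set.contains_iff s (r + 1)).1 hc)
            · intro hc
              exact hno (r - 1) (le_refl _) (by omega) ((PySem.Set.contains_iff s (r - 1)).1 hc)
          have hB : stepB (ls, m) r = (x :: xs, m) := by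
            unfold stepB; rw [hls']
            simp [hx1, hx2]
          rw [hA, hB]
          apply ih s (x :: xs) m hpw' hdisj' hsnd hsL hxsSubL hxs' hlen
          intro y hy hynls' r' hr'
          have := hdead' y hy (hls' ▸ hynls')
          have := hrlt r' hr'
          omega

-- ===== VERDICT (by name: the statement is the Claim_ definition above) =====
theorem solution_spec : Claim_equal_solution := by
  intro n lost reserve _
  unfold Spec_solution solution solution_alt
  set s0 : List Int := PySem.Set.diff (PySem.Set.ofList lost) (PySem.Set.ofList reserve) with hs0def
  set L : List Int := PySem.List.sorted s0 (fun x => x) false with hLdef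
  set R : List Int :=
    PySem.List.sorted (PySem.Set.diff (PySem.Set.ofList reserve) (PySem.Set.ofList lost)) (fun x => x) false with hRdef
  have hs0nd : s0.Nodup := PySem.Set.nodup_diff _ _ (PySem.Set.nodup_ofList lost)
  have hLperm : L.Perm s0 := PySem.List.sorted_perm _ _ _
  have hLnd : L.Nodup := hLperm.nodup_iff.2 hs0nd
  have hLpw : L.Pairwise (· < ·) := by
    have hle : L.Pairwise (fun a b => a ≤ b) := PySem.List.sorted_pairwise _ _
    exact (List.pairwise_and_iff.2 ⟨hle, hLnd⟩).imp (fun h => lt_of_le_of_ne h.1 h.2)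
  have hRperm : R.Perm (PySem.Set.diff (PySem.Set.ofList reserve) (PySem.Set.ofList lost)) :=
    PySem.List.sorted_perm _ _ _
  have hRnd : R.Nodup := hRperm.nodup_iff.2 (PySem.Set.nodup_diff _ _ (PySem.Set.nodup_ofList reserve))
  have hRpw : R.Pairwise (· < ·) := by
    have hle : R.Pairwise (fun a b => a ≤ b) := PySem.List.sorted_pairwise _ _
    exact (List.pairwise_and_iff.2 ⟨hle, hRnd⟩).imp (fun h => lt_of_le_of_ne h.1 h.2)
  have hdisj : ∀ r ∈ R, r ∉ L := by
    intro r hr hrL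
    have hr' := (PySem.Set.mem_diff _ _ _).1 (hRperm.subset hr)
    have hL' := (PySem.Set.mem_diff _ _ _).1 (hLperm.subset hrL)
    exact hL'.2 hr'.1
  have key := loop_inv L hLpw R s0 L 0 hRpw hdisj hs0nd
    (fun x hx => hLperm.mem_iff.2 hx) (List.Sublist.refl L)
    (fun x hx => hLperm.mem_iff.1 hx) (by have := hLperm.length_eq; omega)
    (fun x hx hxL => absurd (hLperm.mem_iff.2 hx) hxL)
  show n - PySem.Set.len (R.foldl _ s0) = n - ((L.length : Int) - (R.foldl _ (L, (0 : Int))).2)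
  have hfoldA : R.foldl (fun s i =>
      if PySem.Set.contains s (i - 1) then PySem.Set.discard s (i - 1)
      else if PySem.Set.contains s (i + 1) then PySem.Set.discard s (i + 1)
      else s) s0 = R.foldl stepA s0 := rfl
  have hfoldB : R.foldl (fun (st : List Int × Int) r =>
      let ls := dropBelow r st.1
      match ls with
      | [] => (([] : List Int), st.2)
      | x :: xs => if x = r - 1 ∨ x = r + 1 then (xs, st.2 + 1) else (x :: xs, st.2)) (L, (0 : Int))
      = R.foldl stepB (L, 0) := rfl
  rw [hfoldA, hfoldB]
  simp only [PySem.Set.len] at *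
  omega
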